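-- pv_equiv track=rewrite | github.com/Kaikaikai0622/FinDoc-RAG-project | src/ingestion/chunker.py | _split_table_by_rows
-- ===== SOURCE A (Python) =====
-- from typing import List, Dict, Any, Optional
--
-- TABLE_ROWS_PER_SEGMENT = 30
--
-- def _split_table_by_rows(header_prefix: str, body_lines: List[str]) -> List[str]:
--     """将超长 Markdown 表格按行分段。
--
--     每段保留表头前缀（含 【标题】 行和 Markdown 表头/分隔行），
--     后跟最多 TABLE_ROWS_PER_SEGMENT 条数据行。
--
--     Args:
--         header_prefix: 表格头部文本（标题注入行 + Markdown 表头两行），已含换行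
--         body_lines:    Markdown 表格数据行列表（不含表头两行）
--
--     Returns:
--         分段后的字符串列表，每项为一个独立 chunk 的文本
--     """
--     segments: List[str] = []
--     total = len(body_lines)
--     for start in range(0, total, TABLE_ROWS_PER_SEGMENT):
--         batch = body_lines[start: start + TABLE_ROWS_PER_SEGMENT]
--         seg_text = header_prefix + "\n".join(batch)
--         segments.append(seg_text)
--     return segments if segments else [header_prefix]
-- ===== SOURCE B (Python) =====
-- from typing import List
--
-- TABLE_ROWS_PER_SEGMENT = 30
--
-- def _split_table_by_rows(header_prefix: str, body_lines: List[str]) -> List[str]: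
--     """Single pass over the lines with a running buffer, flushed every
--     TABLE_ROWS_PER_SEGMENT lines and once more at the end."""
--     segments: List[str] = []
--     buffer: List[str] = []
--     for line in body_lines:
--         buffer.append(line)
--         if len(buffer) == TABLE_ROWS_PER_SEGMENT:
--             segments.append(header_prefix + "\n".join(buffer))
--             buffer = []
--     if buffer:
--         segments.append(header_prefix + "\n".join(buffer))
--     return segments if segments else [header_prefix]
-- ===== Notes on version B (the rewrite author's own statement) =====
-- stated objective: alternative
-- what changed: Replaces the stepped-range index slicing (range(0, total, 30) + list slices) with a single pass over the lines that accumulates a buffer and flushes it every 30 lines and at the end.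
import Mathlib
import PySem

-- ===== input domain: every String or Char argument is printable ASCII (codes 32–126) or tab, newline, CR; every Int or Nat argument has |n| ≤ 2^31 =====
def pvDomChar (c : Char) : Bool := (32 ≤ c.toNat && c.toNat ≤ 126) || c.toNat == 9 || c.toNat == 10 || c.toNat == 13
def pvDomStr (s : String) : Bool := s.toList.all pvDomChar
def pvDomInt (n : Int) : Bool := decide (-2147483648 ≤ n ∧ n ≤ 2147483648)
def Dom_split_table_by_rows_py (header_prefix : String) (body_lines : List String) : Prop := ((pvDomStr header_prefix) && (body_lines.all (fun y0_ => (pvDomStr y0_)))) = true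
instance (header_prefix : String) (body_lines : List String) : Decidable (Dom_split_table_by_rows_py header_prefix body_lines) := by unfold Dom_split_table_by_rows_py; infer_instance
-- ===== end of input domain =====

-- B replaces A's stepped-range slicing with a one-pass buffer accumulator flushed every 30 lines (alternative decomposition, same cost, return value proved equal).

-- ===== PORT A =====
-- literal port of A: for start in range(0, total, 30): segments.append(header_prefix + "\n".join(body_lines[start:start+30]))
def split_table_by_rows_py (header_prefix : String) (body_lines : List String) : List String :=
  let total : Int := (body_lines.length : Int)
  let segments : List String :=
    (PySem.List.pyRange 0 total 30).foldl
      (fun segs start =>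
        let batch := PySem.List.slice body_lines (some start) (some (start + 30))
        let seg_text := header_prefix ++ PySem.Str.join "\n" batch
        segs ++ [seg_text]) []
  if segments.isEmpty then [header_prefix] else segments

-- ===== PORT B =====
-- one loop step of B: append the line to the buffer; flush it as a segment once it holds 30 lines
def bStep (header_prefix : String) (st : List String × List String) (line : String) :
    List String × List String :=
  let buf := st.2 ++ [line]
  if buf.length = 30 then (st.1 ++ [header_prefix ++ PySem.Str.join "\n" buf], [])
  else (st.1, buf)

def split_table_by_rows_py_alt (header_prefix : String) (body_lines : List String) : List String :=
  let st := body_lines.foldl (bStep header_prefix) ([], [])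
  let segments :=
    if st.2.isEmpty then st.1
    else st.1 ++ [header_prefix ++ PySem.Str.join "\n" st.2]
  if segments.isEmpty then [header_prefix] else segments

-- ===== PRECONDITION & SPEC =====
def Spec_split_table_by_rows_py (header_prefix : String) (body_lines : List String) (out : List String) : Prop := out = split_table_by_rows_py_alt header_prefix body_lines
instance (header_prefix : String) (body_lines : List String) (out : List String) : Decidable (Spec_split_table_by_rows_py header_prefix body_lines out) := by unfold Spec_split_table_by_rows_py; infer_instance

-- ===== CLAIM (what is proved, stated in full; the proofs are below) =====
def Claim_equal_split_table_by_rows_py : Prop := ∀ (header_prefix : String) (body_lines : List String), Dom_split_table_by_rows_py header_prefix body_lines → Spec_split_table_by_rows_py header_prefix body_lines (split_table_by_rows_py header_prefix body_lines)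

-- ===== LEMMAS AND PROOFS =====

-- the 30-line chunks of a list (proof-side characterisation both ports are reduced to)
def chunks (ls : List String) : List (List String) :=
  if _h : ls = [] then [] else ls.take 30 :: chunks (ls.drop 30)
termination_by ls.length
decreasing_by
  simp only [List.length_drop]
  have := List.length_pos_iff.mpr _h
  omega

theorem chunks_nil : chunks [] = [] := by rw [chunks]; simp

theorem chunks_cons (ls : List String) (h : ls ≠ []) :
    chunks ls = ls.take 30 :: chunks (ls.drop 30) := by
  rw [chunks]; simp [h]

-- (chunks ls).map f as a map over List.range
theorem chunks_map (f : List String → String) (ls : List String) :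
    (chunks ls).map f
      = (List.range ((ls.length + 29) / 30)).map
          (fun k => f ((ls.drop (30 * k)).take 30)) := by
  rw [chunks]
  split
  · rename_i h; subst h; simp
  · rename_i h
    have hlen : 1 ≤ ls.length := List.length_pos_iff.mpr h
    have hcnt : (ls.length + 29) / 30 = ((ls.drop 30).length + 29) / 30 + 1 := by
      simp only [List.length_drop]; omega
    rw [hcnt, List.range_succ_eq_map]
    simp only [List.map_cons, List.map_map]
    rw [chunks_map f (ls.drop 30)]
    refine congrArg₂ List.cons ?_ ?_
    · simp
    · refine List.map_congr_left ?_
      intro k _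
      simp only [Function.comp, Nat.succ_eq_add_one, List.drop_drop]
      have h2 : 30 * (k + 1) = 30 * k + 30 := by ring
      rw [h2]
      have h3 : 30 * k + 30 = 30 + 30 * k := by ring
      rw [h3]
termination_by ls.length
decreasing_by
  simp only [List.length_drop]
  omega

-- A's stepped range of slices, as the same map over List.range
theorem A_map (f : List String → String) (ls : List String) :
    (PySem.List.pyRange 0 (ls.length : Int) 30).map
        (fun s => f (PySem.List.slice ls (some s) (some (s + 30))))
      = (List.range ((ls.length + 29) / 30)).map
          (fun k => f ((ls.drop (30 * k)).take 30)) := by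
  rw [PySem.List.pyRange_of_pos 0 (ls.length : Int) (by norm_num : (0:Int) < 30)]
  have hcnt : (if (0:Int) < (ls.length : Int)
      then (((ls.length : Int) - 0 + 30 - 1) / 30).toNat else 0)
      = (ls.length + 29) / 30 := by
    split <;> omega
  rw [hcnt, List.map_map]
  refine List.map_congr_left ?_
  intro k _
  simp only [Function.comp]
  have h1 : (0:Int) + 30 * (k : Int) = ((30 * k : Nat) : Int) := by push_cast; ring
  rw [h1]
  have h2 : ((30 * k : Nat) : Int) + 30 = ((30 * k : Nat) : Int) + ((30 : Nat) : Int) := by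
    norm_num
  rw [h2, PySem.List.slice_natCast_add]

-- B's buffer loop flushes exactly the 30-line chunks of buf ++ ls
theorem foldB (hd : String) : ∀ (ls segs buf : List String), buf.length < 30 →
    (if (ls.foldl (bStep hd) (segs, buf)).2.isEmpty
      then (ls.foldl (bStep hd) (segs, buf)).1
      else (ls.foldl (bStep hd) (segs, buf)).1
            ++ [hd ++ PySem.Str.join "\n" (ls.foldl (bStep hd) (segs, buf)).2])
    = segs ++ (chunks (buf ++ ls)).map (fun b => hd ++ PySem.Str.join "\n" b) := by
  intro ls
  induction ls with
  | nil =>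
    intro segs buf hb
    simp only [List.foldl_nil, List.append_nil]
    by_cases hbuf : buf = []
    · subst hbuf; simp [chunks_nil]
    · have ht : buf.take 30 = buf := List.take_of_length_le (by omega)
      have hd30 : buf.drop 30 = [] := List.drop_eq_nil_of_le (by omega)
      rw [chunks_cons buf hbuf, ht, hd30, chunks_nil]
      simp [List.isEmpty_iff, hbuf]
  | cons l ls ih =>
    intro segs buf hb
    simp only [List.foldl_cons, bStep]
    have hsplit : buf ++ l :: ls = (buf ++ [l]) ++ ls := by simp
    by_cases h30 : (buf ++ [l]).length = 30
    · rw [if_pos h30]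
      rw [ih (segs ++ [hd ++ PySem.Str.join "\n" (buf ++ [l])]) [] (by norm_num)]
      have hne : (buf ++ [l]) ++ ls ≠ [] := by simp
      rw [hsplit, chunks_cons _ hne]
      rw [← h30, List.take_left, List.drop_left]
      simp
    · rw [if_neg h30]
      have hlt : (buf ++ [l]).length < 30 := by
        simp only [List.length_append, List.length_singleton] at *
        omega
      rw [ih segs (buf ++ [l]) hlt, hsplit]

-- ===== VERDICT (by name: the statement is the Claim_ definition above) =====
theorem split_table_by_rows_py_spec : Claim_equal_split_table_by_rows_py := by
  intro h ls _
  unfold Spec_split_table_by_rows_py split_table_by_rows_py split_table_by_rows_py_alt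
  dsimp only
  rw [PySem.List.foldl_append_singleton_eq_map, List.nil_append]
  have hA := A_map (fun b => h ++ PySem.Str.join "\n" b) ls
  simp only [] at hA
  rw [hA, ← chunks_map (fun b => h ++ PySem.Str.join "\n" b) ls]
  have hB := foldB h ls [] [] (by norm_num)
  simp only [List.nil_append] at hB
  rw [hB]
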